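-- pv_equiv track=rewrite | github.com/AnOnYmOus001100/Python-Functions-File-and-Dictionaries | week4/course2_assessment_6.py | beginning
-- ===== SOURCE A (Python) =====
-- def beginning(lst):
--     counter = 0
--     sub10 = []
--
--     while counter < len(lst):
--         if lst[counter] != 'bye' and counter < 10:
--             sub10.append(lst[counter])
--         else:
--             return sub10
--         counter += 1
--     return sub10
-- ===== SOURCE B (Python) =====
-- def beginning(lst):
--     window = lst[:10]
--     if 'bye' in window:
--         return window[:window.index('bye')]
--     return window
-- ===== Notes on version B (the rewrite author's own statement) =====
-- stated objective: simpler
-- what changed: Replaces the counter-driven while loop with append accumulator by a slice-then-cut decomposition: take the first 10 elements, then cut at the first 'bye' if present.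
import Mathlib
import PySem

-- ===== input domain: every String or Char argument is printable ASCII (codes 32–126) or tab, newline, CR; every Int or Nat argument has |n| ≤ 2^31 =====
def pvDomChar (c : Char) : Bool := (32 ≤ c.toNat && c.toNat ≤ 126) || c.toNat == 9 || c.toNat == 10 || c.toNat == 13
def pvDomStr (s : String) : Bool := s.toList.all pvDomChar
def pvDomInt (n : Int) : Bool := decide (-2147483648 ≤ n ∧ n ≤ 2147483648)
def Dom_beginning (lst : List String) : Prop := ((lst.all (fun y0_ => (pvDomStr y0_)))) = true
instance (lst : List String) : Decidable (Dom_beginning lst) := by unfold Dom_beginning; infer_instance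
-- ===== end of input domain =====

-- B keeps A's return value on every input; it replaces the counter/accumulator while-loop by "slice to 10, then cut at the first 'bye'".

-- ===== PORT A =====
-- the while-loop of A: state = (counter, sub10); returns sub10 when the guard or the branch stops it
def beginningLoop (lst : List String) (counter : Nat) (sub10 : List String) : List String :=
  if h : counter < lst.length then
    if lst[counter] ≠ "bye" ∧ counter < 10 then
      beginningLoop lst (counter + 1) (sub10 ++ [lst[counter]])
    else sub10
  else sub10
termination_by lst.length - counter

def beginning (lst : List String) : List String :=
  beginningLoop lst 0 []

-- ===== PORT B =====
def beginning_alt (lst : List String) : List String :=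
  let window := lst.take 10
  match PySem.List.index? window "bye" with
  | some i => window.take i
  | none => window

-- ===== PRECONDITION & SPEC =====
def Spec_beginning (lst : List String) (out : List String) : Prop := out = beginning_alt lst
instance (lst : List String) (out : List String) : Decidable (Spec_beginning lst out) := by unfold Spec_beginning; infer_instance

-- ===== CLAIM (what is proved, stated in full; the proofs are below) =====
def Claim_equal_beginning : Prop := ∀ (lst : List String), Dom_beginning lst → Spec_beginning lst (beginning lst)

-- ===== LEMMAS AND PROOFS =====

-- take-while "≠ bye", the common characterisation of both programs
def cutBye : List String → List String
  | [] => []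
  | x :: xs => if x ≠ "bye" then x :: cutBye xs else []

theorem loopA_eq (lst : List String) (counter : Nat) (sub10 : List String) :
    beginningLoop lst counter sub10 = sub10 ++ cutBye ((lst.drop counter).take (10 - counter)) := by
  fun_induction beginningLoop lst counter sub10 with
  | case1 counter sub10 h hc ih =>
    obtain ⟨hne, h10⟩ := hc
    have hd : lst.drop counter = lst[counter] :: lst.drop (counter + 1) :=
      List.drop_eq_getElem_cons h
    have h10' : 10 - counter = (10 - (counter + 1)) + 1 := by omega
    rw [ih, hd, h10', List.take_succ_cons, cutBye]
    simp [hne]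
  | case2 counter sub10 h hc =>
    rcases not_and_or.mp hc with hbye | h10
    · rw [not_not] at hbye
      rw [List.drop_eq_getElem_cons h]
      cases h10 : 10 - counter with
      | zero => simp [cutBye]
      | succ k => simp [cutBye, hbye]
    · have : 10 - counter = 0 := by omega
      simp [this, cutBye]
  | case3 counter sub10 h =>
    have : lst.drop counter = [] := List.drop_eq_nil_of_le (by omega)
    simp [this, cutBye]

theorem alt_eq_cut (ws : List String) :
    (match PySem.List.index? ws "bye" with
     | some i => ws.take i
     | none => ws) = cutBye ws := by
  induction ws with
  | nil => simp [PySem.List.index?_eq_idxOf?, cutBye]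
  | cons x xs ih =>
    by_cases hx : x = "bye"
    · subst hx
      rw [PySem.List.index?_cons_self]
      simp [cutBye]
    · rw [PySem.List.index?_cons_of_ne xs hx]
      cases h : PySem.List.index? xs "bye" with
      | some i =>
        rw [h] at ih
        simp only [Option.map_some]
        simpa [cutBye, hx] using ih
      | none =>
        rw [h] at ih
        simpa [cutBye, hx] using ih

-- ===== VERDICT (by name: the statement is the Claim_ definition above) =====
theorem beginning_spec : Claim_equal_beginning := by
  intro lst _
  unfold Spec_beginning beginning beginning_alt
  rw [loopA_eq]
  simpa using (alt_eq_cut (lst.take 10)).symm
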